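-- pv_equiv track=rewrite | github.com/alexandraback/datacollection | solutions_5765824346324992_1/Python/Spelvin/b-better.py | f
-- ===== SOURCE A (Python) =====
-- def numberserved(minutes,numlist):
-- 	return sum([(minutes // num) + 1 for num in numlist])
--
-- def minutesright(minutes,numlist,position):
-- 	return numberserved(minutes,numlist) >= position and numberserved(minutes-1,numlist) < position
--
-- def maxminutes(numlist,position):
-- 	return (position * min(numlist)) + 1
--
-- def minutesearch(numlist,j,k,position):
-- 	if j == k:
-- 		return j
-- 	if j + 1 == k:
-- 		if minutesright(j,numlist,position):
-- 			return j
-- 		else: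
-- 			return k
-- 	trial = (j + k) // 2
-- 	if minutesright(trial,numlist,position):
-- 		return trial
-- 	elif numberserved(trial,numlist) >= position:
-- 		return minutesearch(numlist,j,trial-1,position)
-- 	else:
-- 		return minutesearch(numlist,trial+1,k,position)
--
-- def minutes(numlist,position):
-- 	return minutesearch(numlist,0,maxminutes(numlist,position),position)
--
-- def f(numlist,position,length):
-- 	endtime = minutes(numlist,position)
-- 	if endtime == 0:
-- 		stationnumber = position
-- 	else:
-- 		stationnumber = position - numberserved(endtime-1,numlist)
-- 	count = 0
-- 	for i in range(length):
-- 		if endtime % numlist[i] == 0: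
-- 			count += 1
-- 			if count == stationnumber:
-- 				return str(i+1)
-- ===== SOURCE B (Python) =====
-- def f(numlist, position, length):
--     def served(t):
--         return sum(t // num + 1 for num in numlist)
--     hi = 1
--     while served(hi) < position:
--         hi *= 2
--     lo = 0
--     while lo < hi:
--         mid = (lo + hi) // 2
--         if served(mid) >= position:
--             hi = mid
--         else:
--             lo = mid + 1
--     endtime = lo
--     station = position - served(endtime - 1)
--     stations = [i for i, num in enumerate(numlist[:length]) if endtime % num == 0]
--     return str(stations[station - 1] + 1)
-- ===== Notes on version B (the rewrite author's own statement) =====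
-- stated objective: alternative
-- what changed: A's recursive three-way binary search over [0, position*min+1] (with a minutesright probe at each step) is replaced by galloping doubling of an upper bracket plus a standard iterative lower-bound bisection; the endtime==0 special case is dropped since numberserved(-1)=0 makes it redundant, and the counting for-loop over stations is replaced by filtering enumerate(numlist[:length]) and indexing the resulting list.
-- outside the precondition, e.g. on f([1, 2], 1, 1): A returns '1', B returns '1'; on f([-1], 1, 1): A returns '1', B does not finish within the time limit
import Mathlib
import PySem

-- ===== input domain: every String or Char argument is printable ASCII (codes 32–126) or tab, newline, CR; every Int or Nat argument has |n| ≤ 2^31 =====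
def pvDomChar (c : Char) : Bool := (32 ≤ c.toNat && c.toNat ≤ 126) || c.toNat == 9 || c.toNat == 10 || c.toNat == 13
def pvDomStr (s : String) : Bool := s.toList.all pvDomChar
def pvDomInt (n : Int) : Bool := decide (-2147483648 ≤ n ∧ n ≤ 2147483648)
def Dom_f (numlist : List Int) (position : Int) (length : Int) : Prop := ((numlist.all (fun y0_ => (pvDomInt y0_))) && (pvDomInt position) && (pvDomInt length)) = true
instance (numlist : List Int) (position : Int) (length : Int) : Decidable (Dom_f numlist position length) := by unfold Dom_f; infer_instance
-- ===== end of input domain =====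

-- B replaces A's recursive three-way binary search over [0, position*min+1] by galloping doubling plus an
-- iterative lower-bound bisection, drops the endtime==0 special case (numberserved(-1)=0 makes it redundant),
-- and replaces the counting scan by filter-then-index; equivalence is proved on the return value only.

-- ===== PORT A =====
def numberserved (minutes : Int) (numlist : List Int) : Int :=
  (numlist.map (fun num => PySem.Int.floordiv minutes num + 1)).sum

def minutesright (minutes : Int) (numlist : List Int) (position : Int) : Bool :=
  decide (numberserved minutes numlist ≥ position) && decide (numberserved (minutes - 1) numlist < position)

-- min(numlist) raises ValueError on []; Pre_f excludes the empty list, the 0 default is never used there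
def maxminutes (numlist : List Int) (position : Int) : Int :=
  position * ((PySem.List.min? numlist (fun x => x)).getD 0) + 1

-- fuel is a totality guard only: the top-level call passes enough fuel (interval length + 1)
def minutesearch (numlist : List Int) (position : Int) : Nat → Int → Int → Int
  | 0, j, _ => j
  | fuel + 1, j, k =>
    if j == k then j
    else if j + 1 == k then (if minutesright j numlist position then j else k)
    else
      let trial := PySem.Int.floordiv (j + k) 2
      if minutesright trial numlist position then trial
      else if numberserved trial numlist ≥ position then minutesearch numlist position fuel j (trial - 1)
      else minutesearch numlist position fuel (trial + 1) k

def minutesA (numlist : List Int) (position : Int) : Int :=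
  minutesearch numlist position ((maxminutes numlist position).toNat + 1) 0 (maxminutes numlist position)

-- the for-loop of f; none = Python falls through and returns None (excluded by Pre_f);
-- pyGet? none = IndexError (excluded by Pre_f)
def floopA (numlist : List Int) (endtime : Int) (stationnumber : Int) : Nat → Int → Int → Option String
  | 0, _, _ => none
  | fuel + 1, i, count =>
    match PySem.List.pyGet? numlist i with
    | none => none
    | some v =>
      if PySem.Int.mod endtime v == 0 then
        if count + 1 == stationnumber then some (PySem.Int.toStr (i + 1))
        else floopA numlist endtime stationnumber fuel (i + 1) (count + 1)
      else floopA numlist endtime stationnumber fuel (i + 1) count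

def f (numlist : List Int) (position : Int) (length : Int) : String :=
  let endtime := minutesA numlist position
  let stationnumber := if endtime == 0 then position else position - numberserved (endtime - 1) numlist
  (floopA numlist endtime stationnumber length.toNat 0 0).getD ""

-- ===== PORT B =====
def altServed (numlist : List Int) (t : Int) : Int :=
  (numlist.map (fun num => PySem.Int.floordiv t num + 1)).sum

-- fuel is a totality guard only: 64 doublings suffice on the domain (|ints| ≤ 2^31)
def altGallop (numlist : List Int) (position : Int) : Nat → Int → Int
  | 0, hi => hi
  | fuel + 1, hi =>
    if altServed numlist hi < position then altGallop numlist position fuel (hi * 2) else hi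

-- fuel is a totality guard only: the caller passes interval length + 1
def altBisect (numlist : List Int) (position : Int) : Nat → Int → Int → Int
  | 0, lo, _ => lo
  | fuel + 1, lo, hi =>
    if lo < hi then
      let mid := PySem.Int.floordiv (lo + hi) 2
      if altServed numlist mid ≥ position then altBisect numlist position fuel lo mid
      else altBisect numlist position fuel (mid + 1) hi
    else lo

def f_alt (numlist : List Int) (position : Int) (length : Int) : String :=
  let hi := altGallop numlist position 64 1
  let endtime := altBisect numlist position (hi.toNat + 1) 0 hi
  let station := position - altServed numlist (endtime - 1)
  let stations := ((PySem.List.enumerate (PySem.List.slice numlist none (some length)) 0).filter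
    (fun pr => PySem.Int.mod endtime pr.2 == 0)).map Prod.fst
  match PySem.List.pyGet? stations (station - 1) with
  | some i => PySem.Int.toStr (i + 1)
  | none => ""

-- ===== PRECONDITION & SPEC =====
-- Pre_f excludes: the empty list (min([]) raises ValueError), a non-positive service time (0 raises
-- ZeroDivisionError; negative times make the search diverge or return meaningless values), position < 1
-- (A falls through and returns None, not a string), and length < len(numlist) (there A can fall through to
-- None; where A does still return a string B returns the same one — see cites).
def Pre_f (numlist : List Int) (position : Int) (length : Int) : Prop :=
  numlist ≠ [] ∧ (∀ x ∈ numlist, 0 < x) ∧ 1 ≤ position ∧ (numlist.length : Int) ≤ length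
instance (numlist : List Int) (position : Int) (length : Int) : Decidable (Pre_f numlist position length) := by unfold Pre_f; infer_instance

def pvWitness_f : List Int × Int × Int := ([2, 3], 4, 2)

def Spec_f (numlist : List Int) (position : Int) (length : Int) (out : String) : Prop := out = f_alt numlist position length
instance (numlist : List Int) (position : Int) (length : Int) (out : String) : Decidable (Spec_f numlist position length out) := by unfold Spec_f; infer_instance

-- ===== CLAIM (what is proved, stated in full; the proofs are below) =====
def Claim_equal_f : Prop := ∀ (numlist : List Int) (position : Int) (length : Int), Dom_f numlist position length → Pre_f numlist position length → Spec_f numlist position length (f numlist position length)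

-- ===== LEMMAS AND PROOFS =====

-- altServed is numberserved with the arguments flipped
theorem altServed_eq (numlist : List Int) (t : Int) : altServed numlist t = numberserved t numlist := rfl

-- numberserved is monotone in the time when all service times are positive
theorem served_mono {numlist : List Int} (hp : ∀ x ∈ numlist, 0 < x) {a b : Int} (hab : a ≤ b) :
    numberserved a numlist ≤ numberserved b numlist := by
  unfold numberserved
  apply List.sum_le_sum
  intro num hnum
  have h := hp num hnum
  rw [PySem.Int.floordiv_eq_ediv_of_pos h, PySem.Int.floordiv_eq_ediv_of_pos h]
  have := Int.ediv_le_ediv h hab; omega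

-- one minute before the start nobody has been served
theorem served_neg_one {numlist : List Int} (hp : ∀ x ∈ numlist, 0 < x) :
    numberserved (-1) numlist = 0 := by
  induction numlist with
  | nil => simp [numberserved]
  | cons x t ih =>
    have hx : 0 < x := hp x (List.mem_cons_self)
    have hdiv : PySem.Int.floordiv (-1) x = -1 := by
      rw [PySem.Int.floordiv_eq_iff_of_pos hx]; omega
    have ht := ih (fun y hy => hp y (List.mem_cons_of_mem x hy))
    simp only [numberserved, List.map_cons, List.sum_cons] at *
    rw [hdiv]; omega

-- at time position*min+1 at least `position` customers have been served
theorem served_maxminutes {numlist : List Int} (hp : ∀ x ∈ numlist, 0 < x) (hne : numlist ≠ [])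
    {position : Int} (hpos : 1 ≤ position) :
    position ≤ numberserved (maxminutes numlist position) numlist := by
  obtain ⟨m, hm⟩ : ∃ m, PySem.List.min? numlist (fun x => x) = some m := by
    cases h : PySem.List.min? numlist (fun x => x) with
    | none => exact absurd ((PySem.List.min?_eq_none_iff numlist (fun x => x)).mp h) hne
    | some m => exact ⟨m, rfl⟩
  have hmem : m ∈ numlist := PySem.List.min?_mem hm
  have hmpos : 0 < m := hp m hmem
  have hk0 : maxminutes numlist position = position * m + 1 := by
    simp [maxminutes, hm]
  rw [hk0]
  have hk0nn : 0 ≤ position * m + 1 := by positivity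
  have hterm : position ≤ PySem.Int.floordiv (position * m + 1) m := by
    rw [PySem.Int.le_floordiv_iff_mul_le hmpos]; omega
  have hnn : ∀ y ∈ numlist.map (fun num => PySem.Int.floordiv (position * m + 1) num + 1), 0 ≤ y := by
    intro y hy
    obtain ⟨num, hnum, rfl⟩ := List.mem_map.mp hy
    have h0 : (0 : Int) ≤ PySem.Int.floordiv (position * m + 1) num := by
      rw [PySem.Int.le_floordiv_iff_mul_le (hp num hnum)]; omega
    omega
  have hsingle := List.single_le_sum hnn _
    (List.mem_map_of_mem (f := fun num => PySem.Int.floordiv (position * m + 1) num + 1) hmem)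
  beta_reduce at hsingle
  unfold numberserved
  omega

-- the time both searches look for is unique
theorem ans_unique {numlist : List Int} (hp : ∀ x ∈ numlist, 0 < x) {p t t' : Int}
    (h1 : p ≤ numberserved t numlist) (h2 : numberserved (t - 1) numlist < p)
    (h3 : p ≤ numberserved t' numlist) (h4 : numberserved (t' - 1) numlist < p) : t = t' := by
  rcases lt_trichotomy t t' with h | h | h
  · have := served_mono hp (show t ≤ t' - 1 by omega); omega
  · exact h
  · have := served_mono hp (show t' ≤ t - 1 by omega); omega

-- minutesright spelled out
theorem minutesright_iff (t : Int) (numlist : List Int) (p : Int) :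
    minutesright t numlist p = true ↔ (p ≤ numberserved t numlist ∧ numberserved (t - 1) numlist < p) := by
  simp [minutesright, ge_iff_le]

-- A's recursive search is correct under its invariant
theorem minutesearch_correct {numlist : List Int} {p : Int} :
    ∀ (fuel : Nat) (j k : Int), (k - j).toNat < fuel → j ≤ k →
      numberserved (j - 1) numlist < p → p ≤ numberserved k numlist →
      p ≤ numberserved (minutesearch numlist p fuel j k) numlist ∧
        numberserved (minutesearch numlist p fuel j k - 1) numlist < p := by
  intro fuel
  induction fuel with
  | zero => intro j k hf _ _ _; simp at hf
  | succ fuel ih =>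
    intro j k hf hjk hj hk
    simp only [minutesearch, beq_iff_eq]
    split_ifs with h1 h2 h3 h4 h5
    · exact ⟨h1 ▸ hk, hj⟩
    · exact (minutesright_iff _ _ _).mp h3
    · refine ⟨hk, ?_⟩
      have h3' := (minutesright_iff j numlist p).not.mp h3
      push Not at h3'
      have : numberserved (k - 1) numlist = numberserved j numlist := by rw [show k - 1 = j by omega]
      rw [this]
      rcases lt_or_ge (numberserved j numlist) p with h | h
      · exact h
      · exact absurd (h3' h) (by omega)
    · exact (minutesright_iff _ _ _).mp h4
    · have hb := PySem.Int.floordiv_two_mid_bounds (lo := j + 1) (hi := k - 1) (by omega)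
      rw [show j + 1 + (k - 1) = j + k by ring] at hb
      have h4' := (minutesright_iff _ numlist p).not.mp h4
      push Not at h4'
      exact ih j (PySem.Int.floordiv (j + k) 2 - 1) (by omega) (by omega) hj
        (by have := h4' (by exact_mod_cast h5); simpa using this)
    · have hb := PySem.Int.floordiv_two_mid_bounds (lo := j + 1) (hi := k - 1) (by omega)
      rw [show j + 1 + (k - 1) = j + k by ring] at hb
      have h5' : numberserved (PySem.Int.floordiv (j + k) 2) numlist < p := by omega
      exact ih (PySem.Int.floordiv (j + k) 2 + 1) k (by omega) (by omega) (by simpa using h5') hk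

-- B's bisection is correct under the same invariant
theorem altBisect_correct {numlist : List Int} {p : Int} :
    ∀ (fuel : Nat) (lo hi : Int), (hi - lo).toNat < fuel → lo ≤ hi →
      numberserved (lo - 1) numlist < p → p ≤ numberserved hi numlist →
      p ≤ numberserved (altBisect numlist p fuel lo hi) numlist ∧
        numberserved (altBisect numlist p fuel lo hi - 1) numlist < p := by
  intro fuel
  induction fuel with
  | zero => intro lo hi hf _ _ _; simp at hf
  | succ fuel ih =>
    intro lo hi hf hlohi hlo hhi
    simp only [altBisect, altServed_eq]
    split_ifs with h1 h2
    all_goals try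
      have hb1 := (PySem.Int.floordiv_two_mid_bounds (lo := lo) (hi := hi) (by omega)).1
    all_goals try
      have hb2 : PySem.Int.floordiv (lo + hi) 2 < hi :=
        (PySem.Int.floordiv_lt_iff_lt_mul (by omega)).mpr (by omega)
    · exact ih lo (PySem.Int.floordiv (lo + hi) 2) (by omega) (by omega) hlo (by exact_mod_cast h2)
    · have h2' : numberserved (PySem.Int.floordiv (lo + hi) 2) numlist < p := by omega
      exact ih (PySem.Int.floordiv (lo + hi) 2 + 1) hi (by omega) (by omega) (by simpa using h2') hhi
    · have : lo = hi := by omega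
      exact ⟨this ▸ hhi, hlo⟩

-- B's galloping phase reaches a positive upper bracket
theorem altGallop_correct {numlist : List Int} {p : Int} :
    ∀ (fuel : Nat) (hi : Int), 0 < hi → (∃ n, n < fuel ∧ p ≤ numberserved (hi * 2 ^ n) numlist) →
      0 < altGallop numlist p fuel hi ∧ p ≤ numberserved (altGallop numlist p fuel hi) numlist := by
  intro fuel
  induction fuel with
  | zero => rintro hi _ ⟨n, hn, _⟩; omega
  | succ fuel ih =>
    rintro hi hhi ⟨n, hn, hserved⟩
    simp only [altGallop, altServed_eq]
    split_ifs with h1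
    · refine ih (hi * 2) (by omega) ?_
      match n with
      | 0 => simp at hserved; omega
      | n + 1 =>
        exact ⟨n, by omega, by rw [show hi * 2 * 2 ^ n = hi * 2 ^ (n + 1) by ring]; exact hserved⟩
    · exact ⟨hhi, by omega⟩

-- one step of service: between minute e-1 and minute e exactly the divisors of e finish a customer
theorem divstep {num e : Int} (h : 0 < num) :
    PySem.Int.floordiv e num - PySem.Int.floordiv (e - 1) num =
      (if PySem.Int.mod e num = 0 then 1 else 0) := by
  have hqr := PySem.Int.floordiv_mul_add_mod e num
  have hr0 := PySem.Int.mod_nonneg (a := e) h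
  have hrlt := PySem.Int.mod_lt (a := e) h
  by_cases hr : PySem.Int.mod e num = 0
  · rw [if_pos hr]
    have hd : PySem.Int.floordiv (e - 1) num = PySem.Int.floordiv e num - 1 := by
      rw [PySem.Int.floordiv_eq_iff_of_pos h]
      constructor <;> nlinarith
    omega
  · rw [if_neg hr]
    have hr1 : 1 ≤ PySem.Int.mod e num := by omega
    have hd : PySem.Int.floordiv (e - 1) num = PySem.Int.floordiv e num := by
      rw [PySem.Int.floordiv_eq_iff_of_pos h]
      constructor <;> nlinarith
    omega

-- the number of customers served exactly at minute e is the number of stations whose time divides e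
theorem served_diff {numlist : List Int} (hp : ∀ x ∈ numlist, 0 < x) (e : Int) :
    numberserved e numlist - numberserved (e - 1) numlist =
      (numlist.countP (fun v => PySem.Int.mod e v == 0) : Int) := by
  induction numlist with
  | nil => simp [numberserved]
  | cons x t ih =>
    have hx := hp x List.mem_cons_self
    have ht := ih (fun y hy => hp y (List.mem_cons_of_mem x hy))
    have hd := divstep (e := e) hx
    simp only [numberserved, List.map_cons, List.sum_cons] at ht ⊢
    rw [List.countP_cons]
    by_cases hm : PySem.Int.mod e x = 0
    · rw [if_pos hm] at hd
      rw [if_pos (show (PySem.Int.mod e x == 0) = true by simp [hm])]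
      push_cast
      omega
    · rw [if_neg hm] at hd
      rw [if_neg (show ¬ (PySem.Int.mod e x == 0) = true by simp [hm])]
      push_cast
      omega

-- filtering the enumeration counts the same stations
theorem enum_filter_len {e : Int} :
    ∀ (numlist : List Int) (b : Int),
      ((PySem.List.enumerate numlist b).filter (fun pr => PySem.Int.mod e pr.2 == 0)).length =
        numlist.countP (fun v => PySem.Int.mod e v == 0) := by
  intro numlist
  induction numlist with
  | nil => intro b; simp [PySem.List.enumerate_nil]
  | cons x t ih =>
    intro b
    by_cases hm : PySem.Int.mod e x = 0 <;>
      simp [PySem.List.enumerate_cons, List.countP_cons, hm, ih (b + 1)]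

-- A's scanning loop over the in-range indices is indexing into B's filtered enumeration
theorem floopA_enum {nl : List Int} {e s : Int} :
    ∀ (sub : List Int) (b count : Int), 0 ≤ b → nl.drop b.toNat = sub → count < s →
      floopA nl e s sub.length b count =
        ((((PySem.List.enumerate sub b).filter (fun pr => PySem.Int.mod e pr.2 == 0)).map
            Prod.fst)[(s - 1 - count).toNat]?).map (fun i => PySem.Int.toStr (i + 1)) := by
  intro sub
  induction sub with
  | nil => intro b count hb hdrop hcs; rfl
  | cons v t ih =>
    intro b count hb hdrop hcs
    have hv : PySem.List.pyGet? nl b = some v := by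
      rw [PySem.List.pyGet?_of_nonneg (xs := nl) (i := b) hb, ← List.head?_drop, hdrop]; rfl
    have hdrop' : nl.drop (b + 1).toNat = t := by
      rw [show (b + 1).toNat = b.toNat + 1 from by omega, ← List.drop_drop, hdrop]
      rfl
    rw [List.length_cons]
    simp only [floopA, hv]
    by_cases hm : PySem.Int.mod e v = 0
    · by_cases hc : count + 1 = s
      · simp [PySem.List.enumerate_cons, hm, hc, show (s - 1 - count).toNat = 0 by omega]
      · have h1 : (s - 1 - count).toNat = (s - 1 - (count + 1)).toNat + 1 := by omega
        simp [PySem.List.enumerate_cons, hm, hc, h1, ih (b + 1) (count + 1) (by omega) hdrop' (by omega)]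
    · simp [PySem.List.enumerate_cons, hm, ih (b + 1) count (by omega) hdrop' hcs]

-- once the loop has returned, extra fuel does not change the result
theorem floopA_fuel_mono {nl : List Int} {e s : Int} :
    ∀ (f1 f2 : Nat) (i count : Int) (r : String), f1 ≤ f2 →
      floopA nl e s f1 i count = some r → floopA nl e s f2 i count = some r := by
  intro f1
  induction f1 with
  | zero =>
    intro f2 i count r _ h
    rw [show floopA nl e s 0 i count = none from rfl] at h
    simp at h
  | succ f1 ih =>
    intro f2 i count r hle h
    obtain ⟨f2', rfl⟩ : ∃ f2', f2 = f2' + 1 := ⟨f2 - 1, by omega⟩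
    simp only [floopA] at h ⊢
    cases hv : PySem.List.pyGet? nl i with
    | none => simp [hv] at h
    | some v =>
      simp only [hv] at h ⊢
      by_cases hm : (PySem.Int.mod e v == 0) = true
      · rw [if_pos hm] at h ⊢
        by_cases hc : (count + 1 == s) = true
        · rw [if_pos hc] at h ⊢; exact h
        · rw [if_neg hc] at h ⊢; exact ih f2' (i + 1) (count + 1) r (by omega) h
      · rw [if_neg hm] at h ⊢; exact ih f2' (i + 1) count r (by omega) h

-- ===== VERDICT (by name: the statement is the Claim_ definition above) =====
theorem f_spec : Claim_equal_f := by
  unfold Claim_equal_f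
  intro numlist position length hdom hpre
  obtain ⟨hne, hp, hpos, hlen⟩ := hpre
  simp only [Dom_f, Bool.and_eq_true, List.all_eq_true, pvDomInt, decide_eq_true_eq] at hdom
  obtain ⟨⟨hdl, hdp⟩, -⟩ := hdom
  have hneg : numberserved (0 - 1) numlist < position := by
    rw [show (0:Int) - 1 = -1 by ring, served_neg_one hp]; omega
  have hAk := served_maxminutes hp hne hpos
  have hk0nn : 0 ≤ maxminutes numlist position := by
    by_contra h
    have hmono := served_mono hp (show maxminutes numlist position ≤ -1 by omega)
    rw [served_neg_one hp] at hmono; omega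
  have hA := minutesearch_correct ((maxminutes numlist position).toNat + 1) 0
    (maxminutes numlist position) (by omega) (by omega) hneg hAk
  obtain ⟨m, hm⟩ : ∃ m, PySem.List.min? numlist (fun x => x) = some m := by
    cases h : PySem.List.min? numlist (fun x => x) with
    | none => exact absurd ((PySem.List.min?_eq_none_iff numlist (fun x => x)).mp h) hne
    | some m => exact ⟨m, rfl⟩
  have hmem := PySem.List.min?_mem hm
  have hmax : maxminutes numlist position = position * m + 1 := by simp [maxminutes, hm]
  have hpm : position * m ≤ 2 ^ 31 * 2 ^ 31 :=
    mul_le_mul hdp.2 (hdl m hmem).2 (by have := hp m hmem; omega) (by norm_num)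
  have hpow : (2:Int) ^ 31 * 2 ^ 31 + 1 ≤ 2 ^ 63 := by norm_num
  have hle : maxminutes numlist position ≤ 2 ^ 63 := by rw [hmax]; omega
  have hGal := altGallop_correct (numlist := numlist) (p := position) 64 1 (by norm_num)
    ⟨63, by norm_num, by rw [one_mul]; exact le_trans hAk (served_mono hp hle)⟩
  have hB := altBisect_correct ((altGallop numlist position 64 1).toNat + 1) 0
    (altGallop numlist position 64 1) (by omega) (by omega) hneg hGal.2
  have hEq : minutesearch numlist position ((maxminutes numlist position).toNat + 1) 0
      (maxminutes numlist position) =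
      altBisect numlist position ((altGallop numlist position 64 1).toNat + 1) 0
        (altGallop numlist position 64 1) :=
    ans_unique hp hA.1 hA.2 hB.1 hB.2
  unfold Spec_f f f_alt minutesA
  dsimp only
  rw [← hEq, altServed_eq]
  set e := minutesearch numlist position ((maxminutes numlist position).toNat + 1) 0
    (maxminutes numlist position) with he
  have hs1 : 1 ≤ position - numberserved (e - 1) numlist := by have := hA.2; omega
  have hstat : (if e == 0 then position else position - numberserved (e - 1) numlist)
      = position - numberserved (e - 1) numlist := by
    by_cases h0 : e = 0
    · simp [h0, show (0:Int) - 1 = -1 by ring, served_neg_one hp]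
    · simp [h0]
  rw [hstat]
  have hslice : PySem.List.slice numlist none (some length) = numlist := by
    rw [PySem.List.slice_to numlist (by omega)]
    exact List.take_of_length_le (by omega)
  rw [hslice]
  set s := position - numberserved (e - 1) numlist with hs
  set S := ((PySem.List.enumerate numlist 0).filter
      (fun pr => PySem.Int.mod e pr.2 == 0)).map Prod.fst with hS
  have hcount : (s - 1).toNat < S.length := by
    have h1 : S.length = numlist.countP (fun v => PySem.Int.mod e v == 0) := by
      rw [hS, List.length_map, enum_filter_len]
    have h2 := served_diff hp e
    have h3 := hA.1
    omega
  have hloop := floopA_enum (nl := numlist) (e := e) (s := s) numlist 0 0 le_rfl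
    List.drop_zero (by omega)
  have hgetsome : S[(s - 1).toNat]? = some S[(s - 1).toNat] := List.getElem?_eq_getElem hcount
  have hfound : floopA numlist e s numlist.length 0 0 =
      some (PySem.Int.toStr (S[(s - 1).toNat] + 1)) := by
    rw [hloop, show s - 1 - 0 = s - 1 by ring, ← hS, hgetsome]
    rfl
  rw [floopA_fuel_mono _ _ _ _ _ (by omega) hfound]
  rw [PySem.List.pyGet?_of_nonneg (xs := S) (show (0:Int) ≤ s - 1 by omega), hgetsome]
  simp
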